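-- pv_equiv track=rewrite | github.com/robert-cougill/money-alert | report/base_report.py | embed_images
-- ===== SOURCE A (Python) =====
-- def embed_images(file_names, ordered_coins) -> str:
--     body = '<body>'
--
--     for coins in ordered_coins:
--         for file_name in file_names:
--             if coins == file_name.split('.')[0]:
--                 body += '<img class="charts" src="cid:' + file_name.split('.')[0] + '" alt="' + file_name + '">'
--                 continue
--
--     body += '</body>'
--     return body
-- ===== SOURCE B (Python) =====
-- def embed_images(file_names, ordered_coins) -> str:
--     groups = {}
--     for file_name in file_names:
--         prefix = file_name.split('.')[0]
--         groups.setdefault(prefix, []).append(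
--             '<img class="charts" src="cid:' + prefix + '" alt="' + file_name + '">')
--     parts = ['<body>']
--     for coin in ordered_coins:
--         parts.extend(groups.get(coin, []))
--     parts.append('</body>')
--     return ''.join(parts)
-- ===== Notes on version B (the rewrite author's own statement) =====
-- stated objective: alternative
-- what changed: B builds a dict grouping the img tags by file-name dot-prefix in one pass and then looks each coin up, replacing A's inner scan of file_names per coin, and joins a list of parts once instead of repeated string concatenation.
import Mathlib
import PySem

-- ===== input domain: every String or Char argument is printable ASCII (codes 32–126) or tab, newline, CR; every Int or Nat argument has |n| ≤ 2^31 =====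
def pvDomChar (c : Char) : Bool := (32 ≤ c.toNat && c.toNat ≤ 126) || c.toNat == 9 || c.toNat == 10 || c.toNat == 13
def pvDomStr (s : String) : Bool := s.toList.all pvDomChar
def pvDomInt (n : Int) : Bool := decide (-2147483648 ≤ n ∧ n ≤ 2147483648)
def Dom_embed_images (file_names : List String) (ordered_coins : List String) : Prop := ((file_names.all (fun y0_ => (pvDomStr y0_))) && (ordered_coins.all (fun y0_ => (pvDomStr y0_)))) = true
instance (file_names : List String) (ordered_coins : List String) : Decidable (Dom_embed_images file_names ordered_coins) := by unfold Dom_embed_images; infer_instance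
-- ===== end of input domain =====

-- B groups the img tags by file-name dot-prefix in a dict built in one pass, then looks each coin
-- up, replacing A's inner scan of file_names per coin (a different algorithm; same return value).

-- shared helper: file_name.split('.')[0]; splitOn never returns [] so headD "" is exact
def pvPrefixOf (f : String) : String := ((PySem.Str.split? f ".").getD []).headD ""
-- shared helper: the literal img tag both Pythons concatenate
def pvTagOf (f : String) : String :=
  "<img class=\"charts\" src=\"cid:" ++ pvPrefixOf f ++ "\" alt=\"" ++ f ++ "\">"

-- ===== PORT A =====
def embed_images (file_names : List String) (ordered_coins : List String) : String :=
  let body := "<body>"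
  let body := ordered_coins.foldl (fun body coins =>
    file_names.foldl (fun body file_name =>
      if coins == pvPrefixOf file_name then body ++ pvTagOf file_name else body) body) body
  body ++ "</body>"

-- ===== PORT B =====
def embed_images_alt (file_names : List String) (ordered_coins : List String) : String :=
  -- groups.setdefault(prefix, []).append(tag)  ≡  groups[prefix] = groups.get(prefix, []) + [tag]
  let groups : PySem.Dict String (List String) :=
    (file_names.map (fun f => (pvPrefixOf f, pvTagOf f))).foldl
      (fun d p => d.modify p.1 [] (· ++ [p.2])) PySem.Dict.empty
  let parts := ordered_coins.foldl (fun parts coin => parts ++ groups.getD coin []) ["<body>"]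
  PySem.Str.join "" (parts ++ ["</body>"])

-- ===== PRECONDITION & SPEC =====
def Spec_embed_images (file_names : List String) (ordered_coins : List String) (out : String) : Prop := out = embed_images_alt file_names ordered_coins
instance (file_names : List String) (ordered_coins : List String) (out : String) : Decidable (Spec_embed_images file_names ordered_coins out) := by unfold Spec_embed_images; infer_instance

-- ===== CLAIM (what is proved, stated in full; the proofs are below) =====
def Claim_equal_embed_images : Prop := ∀ (file_names : List String) (ordered_coins : List String), Dom_embed_images file_names ordered_coins → Spec_embed_images file_names ordered_coins (embed_images file_names ordered_coins)

-- ===== LEMMAS AND PROOFS =====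

theorem pv_join_nil : PySem.Str.join "" ([] : List String) = "" := rfl

theorem pv_join_cons (x : String) (xs : List String) :
    PySem.Str.join "" (x :: xs) = x ++ PySem.Str.join "" xs := by
  cases xs with
  | nil => simp [PySem.Str.join, PySem.Chars.join, List.intercalate]
  | cons y ys => simp [PySem.Str.join, PySem.Chars.join_cons_cons]

theorem pv_join_append (xs ys : List String) :
    PySem.Str.join "" (xs ++ ys) = PySem.Str.join "" xs ++ PySem.Str.join "" ys := by
  induction xs with
  | nil => simp [pv_join_nil]
  | cons x xs ih => rw [List.cons_append, pv_join_cons, pv_join_cons, ih, String.append_assoc]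

-- A's inner loop over file_names appends exactly the tags of the files whose prefix is `c`
theorem pv_inner_A (c : String) (fs : List String) (b : String) :
    fs.foldl (fun body f => if c == pvPrefixOf f then body ++ pvTagOf f else body) b
      = b ++ PySem.Str.join "" ((fs.filter (fun f => pvPrefixOf f == c)).map pvTagOf) := by
  induction fs generalizing b with
  | nil => simp [pv_join_nil]
  | cons f fs ih =>
      simp only [List.foldl_cons, List.filter_cons]
      by_cases h : c = pvPrefixOf f
      · have hb : (c == pvPrefixOf f) = true := by simp [h]
        have hb2 : (pvPrefixOf f == c) = true := by simp [h]
        rw [hb, hb2, if_pos rfl, if_pos rfl, ih, List.map_cons, pv_join_cons,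
          String.append_assoc]
      · have hb : (c == pvPrefixOf f) = false := by simp [h]
        have hb2 : (pvPrefixOf f == c) = false := by simp [Ne.symm h]
        rw [hb, hb2, if_neg (by simp), if_neg (by simp), ih]

-- B's dict lookup returns the tags of the files whose prefix is `c`, in file order
theorem pv_groups (fs : List String) (c : String) :
    ((fs.map (fun f => (pvPrefixOf f, pvTagOf f))).foldl
        (fun d p => d.modify p.1 [] (· ++ [p.2])) PySem.Dict.empty).getD c []
      = (fs.filter (fun f => pvPrefixOf f == c)).map pvTagOf := by
  rw [PySem.Dict.getD_foldl_modify_append]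
  simp [PySem.Dict.getD_empty, List.filter_map, Function.comp_def]

-- both outer loops, proved together by induction on ordered_coins
theorem pv_outer (fs : List String) (cs : List String) (b : String) (ps : List String)
    (hbp : b = PySem.Str.join "" ps) :
    cs.foldl (fun body c =>
        fs.foldl (fun body f => if c == pvPrefixOf f then body ++ pvTagOf f else body) body) b
      = PySem.Str.join "" (cs.foldl (fun parts c =>
          parts ++ ((fs.map (fun f => (pvPrefixOf f, pvTagOf f))).foldl
            (fun d p => d.modify p.1 [] (· ++ [p.2])) PySem.Dict.empty).getD c []) ps) := by
  induction cs generalizing b ps with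
  | nil => simpa using hbp
  | cons c cs ih =>
      simp only [List.foldl_cons]
      apply ih
      rw [pv_inner_A, pv_groups, pv_join_append, hbp]

-- ===== VERDICT (by name: the statement is the Claim_ definition above) =====
theorem embed_images_spec : Claim_equal_embed_images := by
  intro fs cs _
  show _ = _
  unfold embed_images embed_images_alt
  simp only
  rw [pv_outer fs cs "<body>" ["<body>"] (by rw [pv_join_cons, pv_join_nil]; rfl),
    pv_join_append, pv_join_cons, pv_join_nil]
  rfl
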